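-- pv_equiv track=rewrite | github.com/danieltimko/aoc | 2022/17.py | get_depths
-- ===== SOURCE A (Python) =====
-- def get_depths(grid):
--     depths = ''  # interpret it as string so it's hashable
--     for c in range(7):
--         i = 1
--         while i < len(grid) and grid[-i][c] != '#':
--             i += 1
--         depths += str(i) + ','
--     return depths
-- ===== SOURCE B (Python) =====
-- def get_depths(grid):
--     # One bottom-up pass, all columns at once.  The topmost row never needs to be
--     # scanned: a column whose first '#' is in the topmost row has depth len(grid),
--     # which is already the default.
--     depths = [len(grid)] * 7
--     unresolved = list(range(7))
--     for i, row in enumerate(reversed(grid[1:]), start=1):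
--         if not unresolved:
--             break
--         still = []
--         for c in unresolved:
--             if row[c] == '#':
--                 depths[c] = i
--             else:
--                 still.append(c)
--         unresolved = still
--     return ''.join(str(d) + ',' for d in depths)
-- ===== Notes on version B (the rewrite author's own statement) =====
-- stated objective: alternative
-- what changed: A scans the grid bottom-up once per column (seven independent while loops); B makes a single bottom-up pass over the rows, resolving all seven columns at once and stopping early once every column has found its '#' (the topmost row is never scanned: a first '#' there yields depth len(grid), the default).
-- intended difference: On the empty grid A returns '1,1,1,1,1,1,1,' (the loop counter's never-advanced initial value), while B returns '0,0,0,0,0,0,0,' - the grid height, the intended depth when there are no rows at all. — e.g. on get_depths([]): A returns "1,1,1,1,1,1,1,", B returns "0,0,0,0,0,0,0,"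
import Mathlib
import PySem

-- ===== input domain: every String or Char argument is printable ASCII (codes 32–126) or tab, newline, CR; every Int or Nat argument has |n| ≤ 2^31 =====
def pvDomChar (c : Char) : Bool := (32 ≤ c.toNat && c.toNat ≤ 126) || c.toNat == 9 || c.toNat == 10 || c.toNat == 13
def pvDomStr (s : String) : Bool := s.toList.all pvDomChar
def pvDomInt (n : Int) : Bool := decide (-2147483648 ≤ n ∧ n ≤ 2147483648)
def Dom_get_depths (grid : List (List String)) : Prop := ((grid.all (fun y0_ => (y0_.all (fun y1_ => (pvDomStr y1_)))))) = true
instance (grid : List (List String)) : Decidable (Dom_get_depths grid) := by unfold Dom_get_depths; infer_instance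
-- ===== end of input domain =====

-- B replaces A's seven per-column bottom-up scans by ONE bottom-up pass over the rows above
-- the bottomless top row that resolves all seven columns at once and stops early once every
-- column has found its '#'. On the empty grid the two differ (see D_ below).

-- ===== PORT A =====
-- the inner 'while i < len(grid) and grid[-i][c] != '#': i += 1' loop
def get_depths_loop (grid : List (List String)) (c : Int) (i : Int) : Int :=
  if _h : i < (grid.length : Int) ∧
      ¬ ((PySem.List.pyGet? grid (-i)).bind (fun row => PySem.List.pyGet? row c) = some "#")
  then get_depths_loop grid c (i + 1)
  else i
termination_by ((grid.length : Int) - i).toNat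
decreasing_by omega

def get_depths (grid : List (List String)) : String :=
  (PySem.List.pyRange 0 7 1).foldl
    (fun depths c => depths ++ (PySem.Int.toStr (get_depths_loop grid c 1) ++ ",")) ""

-- ===== PORT B =====
-- inner 'for c in unresolved: …' body; state = (depths, still)
def get_depths_inner (row : List String) (i : Int)
    (st : List Int × List Int) (c : Int) : List Int × List Int :=
  if PySem.List.pyGet? row c = some "#"
  then (PySem.List.pySetD st.1 c i, st.2)
  else (st.1, st.2 ++ [c])

-- 'for i, row in enumerate(reversed(grid), start=1): if not unresolved: break; …'
def get_depths_rows : List (List String) → Int → List Int → List Int → List Int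
  | [], _, depths, _ => depths
  | row :: rest, i, depths, unresolved =>
    if unresolved = [] then depths
    else
      let st := unresolved.foldl (get_depths_inner row (i + 1)) (depths, [])
      get_depths_rows rest (i + 1) st.1 st.2

def get_depths_alt (grid : List (List String)) : String :=
  let depths := get_depths_rows (grid.drop 1).reverse 0
    (List.replicate 7 (grid.length : Int)) (PySem.List.pyRange 0 7 1)
  depths.foldl (fun out d => out ++ (PySem.Int.toStr d ++ ",")) ""

-- ===== PRECONDITION & SPEC =====
-- Pre_ states exactly the inputs on which A returns: scanning each column bottom-up through
-- the rows below the top one, every row reached before that column's first '#' must have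
-- more than c cells (otherwise A raises IndexError).
def Pre_get_depths (grid : List (List String)) : Prop :=
  ∀ c < 7, ∀ i < (grid.reverse.take (grid.length - 1)).length,
    (∀ j < i, ((grid.reverse.take (grid.length - 1))[j]!)[c]? ≠ some "#") →
      c < ((grid.reverse.take (grid.length - 1))[i]!).length
instance (grid : List (List String)) : Decidable (Pre_get_depths grid) := by
  unfold Pre_get_depths; infer_instance

def pvWitness_get_depths : List (List String) :=
  [["#", ".", ".", ".", ".", ".", "."], [".", ".", "#", ".", ".", ".", "#"]]

-- On the empty grid A returns '1,1,1,1,1,1,1,' (the loop counter's never-advanced initial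
-- value), while B returns '0,0,0,0,0,0,0,' — the grid height, the intended depth when there
-- are no rows at all.
def D_get_depths (grid : List (List String)) : Prop := grid = []
instance (grid : List (List String)) : Decidable (D_get_depths grid) := by
  unfold D_get_depths; infer_instance

def Spec_get_depths (grid : List (List String)) (out : String) : Prop :=
  ¬ D_get_depths grid → out = get_depths_alt grid
instance (grid : List (List String)) (out : String) : Decidable (Spec_get_depths grid out) := by
  unfold Spec_get_depths; infer_instance

def pvDiffWitness_get_depths : List (List String) := []
def pvDiffWitnessOut_get_depths : String × String := ("1,1,1,1,1,1,1,", "0,0,0,0,0,0,0,")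

-- ===== CLAIM (what is proved, stated in full; the proofs are below) =====
def Claim_unchanged_get_depths : Prop :=
  ∀ (grid : List (List String)), Dom_get_depths grid → Pre_get_depths grid →
    Spec_get_depths grid (get_depths grid)
def Claim_changed_get_depths : Prop :=
  Dom_get_depths (pvDiffWitness_get_depths) ∧ Pre_get_depths (pvDiffWitness_get_depths) ∧
  D_get_depths (pvDiffWitness_get_depths) ∧
  get_depths (pvDiffWitness_get_depths) = pvDiffWitnessOut_get_depths.1 ∧
  get_depths_alt (pvDiffWitness_get_depths) = pvDiffWitnessOut_get_depths.2 ∧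
  pvDiffWitnessOut_get_depths.1 ≠ pvDiffWitnessOut_get_depths.2
def Claim_exact_get_depths : Prop :=
  ∀ (grid : List (List String)), Dom_get_depths grid → Pre_get_depths grid →
    D_get_depths grid → get_depths grid ≠ get_depths_alt grid

-- ===== LEMMAS AND PROOFS =====

-- the per-column hit predicate both ports test
def pvHit (c : Int) (row : List String) : Bool := PySem.List.pyGet? row c == some "#"

-- the rows A scans: grid[-1], …, grid[-(n-1)] (A's while loop never examines the top row)
def pvRows (grid : List (List String)) : List (List String) :=
  grid.reverse.take (grid.length - 1)

-- the depth A computes for column c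
def pvDepth (grid : List (List String)) (c : Int) : Int :=
  match (pvRows grid).findIdx? (pvHit c) with
  | some k => (k : Int) + 1
  | none => max (grid.length : Int) 1

-- the depth B computes for column c: first hit over reversed(grid[1:]), default = grid height
def pvDepthB (grid : List (List String)) (c : Int) : Int :=
  match (grid.drop 1).reverse.findIdx? (pvHit c) with
  | some k => (k : Int) + 1
  | none => (grid.length : Int)

theorem pvRows_length (grid : List (List String)) :
    (pvRows grid).length = grid.length - 1 := by
  simp [pvRows]

-- B scans exactly the rows A scans, and A's not-found default max(n,1) is n off D_
theorem pvDepth_eq_B (grid : List (List String)) (hne : grid ≠ []) (c : Int) :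
    pvDepth grid c = pvDepthB grid c := by
  have hn : 1 ≤ grid.length := List.length_pos_iff.mpr hne
  have hrows : (grid.drop 1).reverse = pvRows grid := by
    rw [pvRows, List.reverse_drop]
  rw [pvDepth, pvDepthB, hrows]
  cases hf : (pvRows grid).findIdx? (pvHit c) with
  | some k => rfl
  | none => simp; omega

theorem loopA_stop (grid : List (List String)) (c : Int) (j : Nat)
    (h : (grid.length : Int) ≤ (j : Int) + 1) :
    get_depths_loop grid c ((j : Int) + 1) =
      match ((pvRows grid).drop j).findIdx? (pvHit c) with
      | some k => (j : Int) + 1 + k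
      | none => max (grid.length : Int) ((j : Int) + 1) := by
  rw [get_depths_loop, dif_neg (by omega : ¬ (((j : Int) + 1 < (grid.length : Int)) ∧ _))]
  have hnil : (pvRows grid).drop j = [] :=
    List.drop_eq_nil_of_le (by rw [pvRows_length]; omega)
  rw [hnil]
  simp [max_eq_right h]

theorem loopA_aux (grid : List (List String)) (c : Int) :
    ∀ (m j : Nat), grid.length ≤ j + m →
    get_depths_loop grid c ((j : Int) + 1) =
      match ((pvRows grid).drop j).findIdx? (pvHit c) with
      | some k => (j : Int) + 1 + k
      | none => max (grid.length : Int) ((j : Int) + 1) := by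
  intro m
  induction m with
  | zero => intro j hj; exact loopA_stop grid c j (by omega)
  | succ m ih =>
    intro j hj
    by_cases hlt : (j : Int) + 1 < (grid.length : Int)
    · have hjn : j + 1 < grid.length := by exact_mod_cast hlt
      have hjR : j < (pvRows grid).length := by rw [pvRows_length]; omega
      have hdrop : (pvRows grid).drop j = (pvRows grid)[j] :: (pvRows grid).drop (j + 1) :=
        List.drop_eq_getElem_cons hjR
      have hRj : (pvRows grid)[j] = grid[grid.length - 1 - j]'(by omega) := by
        simp [pvRows, List.getElem_take, List.getElem_reverse]
      have hget : PySem.List.pyGet? grid (-((j : Int) + 1)) =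
          some (grid[grid.length - 1 - j]'(by omega)) := by
        have h1 := PySem.List.pyGet?_neg_natCast (xs := grid) (k := j + 1)
          (by omega) (by omega)
        have h2 : (-(((j : Nat) + 1 : Nat) : Int)) = -((j : Int) + 1) := by push_cast; ring
        rw [h2] at h1
        rw [h1, List.getElem?_eq_getElem (by omega)]
        congr 1
        congr 1
        omega
      by_cases hp : PySem.List.pyGet? (grid[grid.length - 1 - j]'(by omega)) c = some "#"
      · rw [get_depths_loop, dif_neg (by
          rintro ⟨-, hne⟩
          apply hne
          rw [hget, Option.bind_some]
          exact hp)]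
        rw [hdrop, List.findIdx?_cons, if_pos (by simp [pvHit, hRj, hp])]
        simp
      · rw [get_depths_loop, dif_pos ⟨hlt, by rw [hget, Option.bind_some]; exact hp⟩]
        have hcast : (j : Int) + 1 + 1 = (((j + 1 : Nat)) : Int) + 1 := by push_cast; ring
        rw [hcast, ih (j + 1) (by omega)]
        rw [hdrop, List.findIdx?_cons, if_neg (by simp [pvHit, hRj, hp])]
        cases h' : ((pvRows grid).drop (j + 1)).findIdx? (pvHit c) with
        | none => simp only [Option.map_none]
                  rw [max_eq_left (by omega), max_eq_left (by omega)]
        | some k => simp only [Option.map_some]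
                    push_cast; ring
    · exact loopA_stop grid c j (by omega)

theorem loopA_full (grid : List (List String)) (c : Int) :
    get_depths_loop grid c 1 = pvDepth grid c := by
  have h := loopA_aux grid c grid.length 0 (by omega)
  simp only [Nat.cast_zero, zero_add, List.drop_zero] at h
  rw [h, pvDepth]
  cases hf : (pvRows grid).findIdx? (pvHit c) with
  | some k => show (1 + (k:Int)) = (k:Int) + 1; omega
  | none => rfl

theorem inner_snd (row : List String) (i : Int) :
    ∀ (U d acc : List Int),
      (U.foldl (get_depths_inner row i) (d, acc)).2 = acc ++ U.filter (fun c => !pvHit c row) := by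
  intro U
  induction U with
  | nil => simp
  | cons c U ih =>
    intro d acc
    by_cases hp : PySem.List.pyGet? row c = some "#" <;>
      simp [get_depths_inner, hp, pvHit, ih]

theorem inner_fst_len (row : List String) (i : Int) :
    ∀ (U d acc : List Int),
      (U.foldl (get_depths_inner row i) (d, acc)).1.length = d.length := by
  intro U
  induction U with
  | nil => simp
  | cons c U ih =>
    intro d acc
    by_cases hp : PySem.List.pyGet? row c = some "#" <;>
      simp [get_depths_inner, hp, ih, PySem.List.length_pySetD]

theorem inner_fst_get (row : List String) (i : Int) :
    ∀ (U : List Int), (∀ c ∈ U, 0 ≤ c ∧ c < 7) →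
    ∀ (d acc : List Int), d.length = 7 → ∀ (k : Nat), k < 7 →
      (U.foldl (get_depths_inner row i) (d, acc)).1[k]? =
        if ((k : Int) ∈ U ∧ pvHit (k : Int) row = true) then some i else d[k]? := by
  intro U
  induction U with
  | nil => intro _ d acc _ k hk; simp
  | cons c U ih =>
    intro hU d acc hd k hk
    have hc := hU c (by simp)
    have hU' : ∀ c ∈ U, 0 ≤ c ∧ c < 7 := fun c hcU => hU c (by simp [hcU])
    by_cases hp : PySem.List.pyGet? row c = some "#"
    · rw [List.foldl_cons,
        show get_depths_inner row i (d, acc) c = (PySem.List.pySetD d c i, acc) from by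
          simp [get_depths_inner, hp]]
      rw [ih hU' _ acc (by rw [PySem.List.length_pySetD]; exact hd) k hk]
      have hset : (PySem.List.pySetD d c i)[k]? = if c = (k : Int) then some i else d[k]? := by
        rw [PySem.List.pySetD_of_nonneg d (i := c) i hc.1, List.getElem?_set]
        by_cases hck : c.toNat = k
        · rw [if_pos hck, if_pos (by omega), if_pos (by omega)]
        · rw [if_neg hck, if_neg (by omega)]
      by_cases hck : (k : Int) = c
      · have hhit : pvHit (k : Int) row = true := by simp [pvHit, hck, hp]
        have hsetk : (PySem.List.pySetD d c i)[k]? = some i := by rw [hset, if_pos hck.symm]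
        simp [hhit, hck.symm]
        intro _
        simp [hd, hk]
      · have hsetk : (PySem.List.pySetD d c i)[k]? = d[k]? := by rw [hset, if_neg (by omega)]
        simp [hsetk, List.mem_cons, hck]
    · rw [List.foldl_cons,
        show get_depths_inner row i (d, acc) c = (d, acc ++ [c]) from by
          simp [get_depths_inner, hp]]
      rw [ih hU' d _ hd k hk]
      by_cases hck : (k : Int) = c
      · have hhit : pvHit (k : Int) row = false := by simp [pvHit, hck, hp]
        simp [hhit]
      · simp [List.mem_cons, hck]

-- B's row loop computes pvDepthB-style first hits over any row list, any default
theorem rowsB_eq (rows : List (List String)) (dflt : Int) :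
    ∀ (rest : List (List String)) (j : Nat) (d U : List Int),
    rest = rows.drop j →
    d.length = 7 →
    (∀ k : Nat, k < 7 → d[k]? = some
      (match (rows.take j).findIdx? (pvHit (k : Int)) with
       | some m => (m : Int) + 1
       | none => dflt)) →
    U = (PySem.List.pyRange 0 7 1).filter
      (fun c => ((rows.take j).findIdx? (pvHit c)).isNone) →
    ∀ k : Nat, k < 7 →
      (get_depths_rows rest (j : Int) d U)[k]? =
        some (match rows.findIdx? (pvHit (k : Int)) with
              | some m => (m : Int) + 1
              | none => dflt) := by
  intro rest
  induction rest with
  | nil =>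
    intro j d U hrest hlen hd hU k hk
    have hjn : rows.length ≤ j := by
      have := congrArg List.length hrest
      simp at this
      omega
    have htake : rows.take j = rows := List.take_of_length_le hjn
    have := hd k hk
    rw [htake] at this
    rw [show get_depths_rows [] (j : Int) d U = d from rfl, this]
  | cons row rest' ih =>
    intro j d U hrest hlen hd hU k hk
    by_cases h2 : U = []
    · rw [show get_depths_rows (row :: rest') (j : Int) d U = d from by
        rw [get_depths_rows, if_pos h2]]
      have hmem : (k : Int) ∈ PySem.List.pyRange 0 7 1 := by
        rw [PySem.List.mem_pyRange_one]
        constructor <;> [positivity; exact_mod_cast hk]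
      obtain ⟨m, hm⟩ : ∃ m, (rows.take j).findIdx? (pvHit (k : Int)) = some m := by
        cases hfind : (rows.take j).findIdx? (pvHit (k : Int)) with
        | some m => exact ⟨m, rfl⟩
        | none =>
          exfalso
          have : (k : Int) ∈ U := by
            rw [hU]
            exact List.mem_filter.mpr ⟨hmem, by rw [hfind]; rfl⟩
          rw [h2] at this
          simp at this
      have hfull : rows.findIdx? (pvHit (k : Int)) = some m := by
        conv_lhs => rw [← List.take_append_drop j rows]
        rw [List.findIdx?_append, hm]
        rfl
      rw [hd k hk, hm, hfull]
    · -- this row is scanned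
      have hrev : j < rows.length := by
        by_contra hge
        rw [List.drop_eq_nil_of_le (by omega)] at hrest
        exact (List.cons_ne_nil _ _) hrest
      have hcons : rows.drop j = rows[j] :: rows.drop (j + 1) :=
        List.drop_eq_getElem_cons hrev
      rw [hcons] at hrest
      injection hrest with h_row h_rest
      have htake1 : rows.take (j + 1) = rows.take j ++ [rows[j]] := by
        rw [List.take_add_one, List.getElem?_eq_getElem hrev]
        rfl
      have hlenTake : (rows.take j).length = j := by
        rw [List.length_take]
        omega
      have hUb : ∀ c ∈ U, 0 ≤ c ∧ c < 7 := by
        intro c hcU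
        rw [hU] at hcU
        have := (List.mem_filter.mp hcU).1
        rw [PySem.List.mem_pyRange_one] at this
        exact this
      set st := U.foldl (get_depths_inner row ((j : Int) + 1)) (d, []) with hst
      have hstep : get_depths_rows (row :: rest') (j : Int) d U
          = get_depths_rows rest' ((j : Int) + 1) st.1 st.2 := by
        rw [get_depths_rows, if_neg h2]
      have hhitrow : ∀ c : Int, pvHit c row = pvHit c rows[j] := by
        intro c
        rw [h_row]
      have hlen' : st.1.length = 7 := by rw [hst, inner_fst_len]; exact hlen
      have hd' : ∀ k : Nat, k < 7 → st.1[k]? = some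
          (match (rows.take (j + 1)).findIdx? (pvHit (k : Int)) with
           | some m => (m : Int) + 1
           | none => dflt) := by
        intro k hk
        rw [hst, inner_fst_get row ((j : Int) + 1) U hUb d [] hlen k hk]
        have hkU : (k : Int) ∈ U ↔
            ((rows.take j).findIdx? (pvHit (k : Int))).isNone = true := by
          rw [hU, List.mem_filter]
          simp [PySem.List.mem_pyRange_one]
          omega
        rw [htake1, List.findIdx?_append]
        cases hfind : (rows.take j).findIdx? (pvHit (k : Int)) with
        | some m =>
          have hnotU : (k : Int) ∉ U := by simp [hkU, hfind]
          rw [if_neg (by tauto), hd k hk, hfind]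
          rfl
        | none =>
          have hkU' : (k : Int) ∈ U := by simp [hkU, hfind]
          cases hhit : pvHit (k : Int) row with
          | true =>
            rw [if_pos ⟨hkU', rfl⟩]
            rw [hhitrow] at hhit
            simp [hhit, hlenTake]
          | false =>
            rw [if_neg (by simp [hhit]), hd k hk, hfind]
            rw [hhitrow] at hhit
            simp [hhit]
      have hU' : st.2 = (PySem.List.pyRange 0 7 1).filter
          (fun c => ((rows.take (j + 1)).findIdx? (pvHit c)).isNone) := by
        rw [hst, inner_snd, hU, List.nil_append, List.filter_filter]
        apply List.filter_congr
        intro c _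
        rw [htake1, List.findIdx?_append]
        cases hfind : (rows.take j).findIdx? (pvHit c) with
        | some m => simp
        | none =>
          rw [hhitrow c]
          cases hhit : pvHit c rows[j] <;> simp [hhit]
      have main := ih (j + 1) st.1 st.2 h_rest hlen' hd' hU'
      rw [hstep, show ((j : Int) + 1) = (((j + 1 : Nat) : Int)) from by push_cast; ring]
      exact main k hk

-- B's row loop preserves the length of depths
theorem rows_len :
    ∀ (rest : List (List String)) (i : Int) (d U : List Int),
      (get_depths_rows rest i d U).length = d.length := by
  intro rest
  induction rest with
  | nil => intro i d U; rfl
  | cons row rest' ih =>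
    intro i d U
    rw [get_depths_rows]
    split
    · rfl
    · rw [ih]; exact inner_fst_len row (i + 1) U d []

theorem getA_empty : get_depths [] = "1,1,1,1,1,1,1," := by
  have h : ∀ c : Int, get_depths_loop [] c 1 = 1 := by
    intro c
    rw [get_depths_loop, dif_neg]
    rintro ⟨h1, -⟩
    simp at h1
  rw [get_depths, show PySem.List.pyRange 0 7 1 = [0, 1, 2, 3, 4, 5, 6] from by decide]
  simp only [List.foldl, h]
  decide

-- ===== VERDICT (by name: the statement is the Claim_ definition above) =====
theorem get_depths_spec : Claim_unchanged_get_depths := by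
  intro grid _ _
  unfold Spec_get_depths
  intro hD
  have hne : grid ≠ [] := hD
  have hF := rowsB_eq (grid.drop 1).reverse (grid.length : Int) (grid.drop 1).reverse 0
    (List.replicate 7 (grid.length : Int)) (PySem.List.pyRange 0 7 1)
    (by simp) (by simp)
    (by intro k hk; interval_cases k <;> rfl)
    (by simp)
  simp only [Nat.cast_zero] at hF
  have hlenF : (get_depths_rows (grid.drop 1).reverse 0
      (List.replicate 7 (grid.length : Int)) (PySem.List.pyRange 0 7 1)).length = 7 := by
    rw [rows_len]
    simp
  have hFeq : get_depths_rows (grid.drop 1).reverse 0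
      (List.replicate 7 (grid.length : Int)) (PySem.List.pyRange 0 7 1)
      = [pvDepthB grid 0, pvDepthB grid 1, pvDepthB grid 2, pvDepthB grid 3,
         pvDepthB grid 4, pvDepthB grid 5, pvDepthB grid 6] := by
    apply List.ext_getElem?
    intro k
    by_cases hk : k < 7
    · interval_cases k <;> simpa [pvDepthB] using hF _ (by omega)
    · rw [List.getElem?_eq_none (by rw [hlenF]; omega), List.getElem?_eq_none (by simp; omega)]
  rw [get_depths, get_depths_alt]
  simp only [hFeq]
  rw [show PySem.List.pyRange 0 7 1 = [0, 1, 2, 3, 4, 5, 6] from by decide]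
  simp only [List.foldl, loopA_full, pvDepth_eq_B grid hne]

theorem get_depths_changed : Claim_changed_get_depths := by
  unfold Claim_changed_get_depths
  exact ⟨by decide, by decide, by decide, getA_empty, by decide, by decide⟩

theorem get_depths_tight : Claim_exact_get_depths := by
  intro grid _ _ hD
  rw [hD, getA_empty, show get_depths_alt [] = "0,0,0,0,0,0,0," from by decide]
  decide
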